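-- pv_equiv track=rewrite | github.com/spiffcode/hostile-takeover | stats/createaccount.py | is_valid_player_name
-- ===== SOURCE A (Python) =====
-- def is_valid_player_name(player_name):
--     if not player_name:
--         return False
--     for ch in " \"&<>":
--         if player_name.find(ch) >= 0:
--             return False
--     if len(player_name) < 3 or len(player_name) > 31:
--         return False
--     return True
-- ===== SOURCE B (Python) =====
-- def is_valid_player_name(player_name):
--     # Recursive DFA over the string: state n = number of characters accepted so
--     # far (0..31); a forbidden character or a 32nd character is a dead state,
--     # the end of input accepts iff at least 3 characters were consumed.
--     # Never calls len(); gives up after at most 32 characters.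
--     def go(chars, n):
--         if not chars:
--             return n >= 3
--         if n == 31 or chars[0] in ' "&<>':
--             return False
--         return go(chars[1:], n + 1)
--     return go(player_name, 0)
-- ===== Notes on version B (the rewrite author's own statement) =====
-- stated objective: alternative
-- what changed: Replaced the early-return chain (empty guard, five separate .find scans, then len() bounds) by a recursive finite automaton: one left-to-right pass whose state counts accepted characters, dying on a forbidden character or a 32nd character and accepting at end of input iff at least 3 were consumed; it never computes len().
import Mathlib
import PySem

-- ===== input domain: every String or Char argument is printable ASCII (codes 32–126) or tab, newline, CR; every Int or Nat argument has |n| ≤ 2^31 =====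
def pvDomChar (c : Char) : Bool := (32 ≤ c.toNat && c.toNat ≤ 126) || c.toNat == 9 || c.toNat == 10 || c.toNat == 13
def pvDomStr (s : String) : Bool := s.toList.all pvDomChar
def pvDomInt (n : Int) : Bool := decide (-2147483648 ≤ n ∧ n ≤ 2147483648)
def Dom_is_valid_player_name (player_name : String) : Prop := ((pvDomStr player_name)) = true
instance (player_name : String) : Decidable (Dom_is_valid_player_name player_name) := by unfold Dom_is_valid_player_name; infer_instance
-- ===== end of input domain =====

-- B replaces A's early-return chain (empty guard, five .find scans, len() bounds) by a
-- recursive counting automaton over the characters; same return value everywhere.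

-- ===== PORT A =====
-- A: empty-string guard, then one .find scan per forbidden character, then length bounds.
def is_valid_player_name (player_name : String) : Bool :=
  if player_name == "" then false
  else if (" \"&<>".toList).any (fun ch => decide (0 ≤ PySem.Str.find player_name (String.ofList [ch]))) then false
  else if PySem.Str.len player_name < 3 || PySem.Str.len player_name > 31 then false
  else true

-- ===== PORT B =====
-- B: recursive DFA; state n counts accepted characters, dead on a forbidden
-- character or a 32nd character, accepts at end of input iff n ≥ 3.
def pvGo : List Char → Nat → Bool
  | [], n => decide (n ≥ 3)
  | c :: rest, n => if n == 31 || decide (c ∈ " \"&<>".toList) then false else pvGo rest (n + 1)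

def is_valid_player_name_alt (player_name : String) : Bool :=
  pvGo player_name.toList 0

-- ===== PRECONDITION & SPEC =====
def Spec_is_valid_player_name (player_name : String) (out : Bool) : Prop := out = is_valid_player_name_alt player_name
instance (player_name : String) (out : Bool) : Decidable (Spec_is_valid_player_name player_name out) := by unfold Spec_is_valid_player_name; infer_instance

-- ===== CLAIM (what is proved, stated in full; the proofs are below) =====
def Claim_equal_is_valid_player_name : Prop := ∀ (player_name : String), Dom_is_valid_player_name player_name → Spec_is_valid_player_name player_name (is_valid_player_name player_name)

-- ===== LEMMAS AND PROOFS =====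

-- [c] is an infix of l iff c is an element of l
theorem singleton_infix_iff {α : Type} (c : α) (l : List α) : [c] <:+: l ↔ c ∈ l := by
  constructor
  · rintro ⟨s, t, rfl⟩; simp
  · intro h
    obtain ⟨u, v, rfl⟩ := List.append_of_mem h
    exact ⟨u, v, by simp⟩

-- the per-character .find test of A's loop is just membership of that character
theorem find_single_nonneg_iff (s : String) (c : Char) :
    (0 ≤ PySem.Str.find s (String.ofList [c])) ↔ c ∈ s.toList := by
  rw [PySem.Str.find_nonneg_iff]
  simp [singleton_infix_iff]

-- characterisation of the automaton: with n ≤ 31 it accepts iff no forbidden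
-- character occurs and the total count n + length lies in [3, 31]
theorem pvGo_eq (l : List Char) (n : Nat) (hn : n ≤ 31) :
    pvGo l n = (l.all (fun c => !(c ∈ " \"&<>".toList))
      && decide (3 ≤ n + l.length) && decide (n + l.length ≤ 31)) := by
  induction l generalizing n with
  | nil => simp [pvGo]; omega
  | cons c rest ih =>
    by_cases h31 : n = 31
    · subst h31
      have hcond : ((31 : Nat) == 31 || decide (c ∈ " \"&<>".toList)) = true := by simp
      have hlen : decide (31 + (c :: rest).length ≤ 31) = false := by
        simp
      rw [pvGo, hcond, if_pos rfl, hlen, Bool.and_false]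
    · have hne : (n == 31) = false := by simp [h31]
      by_cases hc : c ∈ " \"&<>".toList
      · have hcond : ((n : Nat) == 31 || decide (c ∈ " \"&<>".toList)) = true :=
          by rw [decide_eq_true hc, Bool.or_true]
        have hnc : (!decide (c ∈ " \"&<>".toList)) = false := by
          rw [decide_eq_true hc]; rfl
        rw [pvGo, hcond, if_pos rfl, List.all_cons, hnc, Bool.false_and, Bool.false_and,
          Bool.false_and]
      · have hcond : ((n : Nat) == 31 || decide (c ∈ " \"&<>".toList)) = false := by
          rw [hne, decide_eq_false hc]; rfl
        have hnc : (!decide (c ∈ " \"&<>".toList)) = true := by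
          rw [decide_eq_false hc]; rfl
        rw [pvGo, hcond, if_neg Bool.false_ne_true, ih (n + 1) (by omega), List.all_cons, hnc,
          Bool.true_and, List.length_cons]
        have h3 : decide (3 ≤ n + 1 + rest.length) = decide (3 ≤ n + (rest.length + 1)) := by
          congr 1; simp; constructor <;> (intro; omega)
        have h31' : decide (n + 1 + rest.length ≤ 31) = decide (n + (rest.length + 1) ≤ 31) := by
          congr 1; simp; constructor <;> (intro; omega)
        rw [h3, h31']
-- ===== VERDICT (by name: the statement is the Claim_ definition above) =====
theorem is_valid_player_name_spec : Claim_equal_is_valid_player_name := by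
  intro s _
  unfold Spec_is_valid_player_name is_valid_player_name is_valid_player_name_alt
  rw [pvGo_eq s.toList 0 (by omega)]
  by_cases hforb : ∃ c ∈ " \"&<>".toList, c ∈ s.toList
  · -- some forbidden character occurs: both sides false
    have hfind : (" \"&<>".toList).any
        (fun ch => decide (0 ≤ PySem.Str.find s (String.ofList [ch]))) = true := by
      obtain ⟨c, hmem, hc⟩ := hforb
      exact List.any_eq_true.mpr
        ⟨c, hmem, decide_eq_true ((find_single_nonneg_iff s c).mpr hc)⟩
    have hall : (s.toList.all (fun c => !(c ∈ " \"&<>".toList))) = false := by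
      obtain ⟨c, hmem, hc⟩ := hforb
      refine List.all_eq_false.mpr ⟨c, hc, ?_⟩
      intro h
      rw [Bool.not_eq_true', decide_eq_false_iff_not] at h
      exact h hmem
    have hne : (s == "") = false := by
      obtain ⟨c, _, hc⟩ := hforb
      have h := List.ne_nil_of_mem hc
      exact beq_eq_false_iff_ne.mpr (fun he => h (by simp [he]))
    simp only [hne, Bool.false_eq_true, if_false, hfind, if_true, hall, Bool.false_and]
  · -- no forbidden character
    have hforb' : ∀ c ∈ s.toList, c ∉ " \"&<>".toList := by
      intro c hc hmem; exact hforb ⟨c, hmem, hc⟩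
    have hfind : (" \"&<>".toList).any
        (fun ch => decide (0 ≤ PySem.Str.find s (String.ofList [ch]))) = false := by
      refine List.any_eq_false.mpr (fun ch hch => ?_)
      simp only [decide_eq_true_eq, find_single_nonneg_iff]
      intro hmem; exact hforb' ch hmem hch
    have hall : (s.toList.all (fun c => !(c ∈ " \"&<>".toList))) = true := by
      refine List.all_eq_true.mpr (fun c hc => ?_)
      rw [Bool.not_eq_true', decide_eq_false_iff_not]; exact hforb' c hc
    by_cases hemp : s = ""
    · subst hemp; decide
    · have hne : (s == "") = false := by simp [hemp]
      simp only [hne, hfind, hall, Bool.false_eq_true, if_false, Bool.true_and]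
      simp only [PySem.Str.len_eq, Nat.zero_add]
      by_cases h3 : s.length < 3 <;> by_cases h31 : 31 < s.length <;>
        first | (simp [h3, h31]; omega) | simp [h3, h31]
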